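-- pv_equiv track=rewrite | github.com/TakaIshikawa/blueprint | src/blueprint/task_legal_terms_impact.py | _required_reviewers
-- ===== SOURCE A (Python) =====
-- from typing import Any, Iterable, Literal, Mapping, TypeVar
--
-- LegalSurface = Literal[
--     "terms_of_service",
--     "privacy_policy",
--     "cookie_consent",
--     "marketing_consent",
--     "subscription_terms",
--     "refund_policy",
--     "payment_terms",
--     "data_processing_agreement",
--     "service_level_agreement",
--     "age_restrictions",
--     "regulated_claims",
-- ]
--
-- _T = TypeVar("_T")
--
-- def _required_reviewers(surfaces: tuple[LegalSurface, ...]) -> tuple[str, ...]: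
--     reviewers: list[str] = []
--     if surfaces:
--         reviewers.append("legal counsel")
--         reviewers.append("product owner")
--     if any(
--         surface in surfaces
--         for surface in (
--             "privacy_policy",
--             "cookie_consent",
--             "marketing_consent",
--             "data_processing_agreement",
--             "age_restrictions",
--         )
--     ):
--         reviewers.append("privacy counsel")
--     if any(
--         surface in surfaces
--         for surface in (
--             "subscription_terms",
--             "refund_policy",
--             "payment_terms",
--             "service_level_agreement",
--         )
--     ):
--         reviewers.append("finance or revenue operations")
--     if "regulated_claims" in surfaces:
--         reviewers.append("compliance reviewer")
--     if "data_processing_agreement" in surfaces: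
--         reviewers.append("security reviewer")
--     if any(surface in surfaces for surface in ("refund_policy", "service_level_agreement")):
--         reviewers.append("support owner")
--     return tuple(_dedupe(reviewers))
--
-- def _dedupe(values: Iterable[_T]) -> list[_T]:
--     deduped: list[_T] = []
--     seen: set[_T] = set()
--     for value in values:
--         if not value or value in seen:
--             continue
--         deduped.append(value)
--         seen.add(value)
--     return deduped
-- ===== SOURCE B (Python) =====
-- _SURFACE_BITS = {
--     "privacy_policy": 1,
--     "cookie_consent": 1,
--     "marketing_consent": 1,
--     "age_restrictions": 1,
--     "data_processing_agreement": 1 | 8,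
--     "regulated_claims": 4,
--     "subscription_terms": 2,
--     "payment_terms": 2,
--     "refund_policy": 2 | 16,
--     "service_level_agreement": 2 | 16,
-- }
--
-- _ROLE_BITS = [
--     (1, "privacy counsel"),
--     (2, "finance or revenue operations"),
--     (4, "compliance reviewer"),
--     (8, "security reviewer"),
--     (16, "support owner"),
-- ]
--
-- def _required_reviewers(surfaces):
--     # One pass over the input: OR together the role-bitmask of each surface.
--     mask = 0
--     for s in surfaces:
--         mask |= _SURFACE_BITS.get(s, 0)
--     roles = ["legal counsel", "product owner"] if surfaces else []
--     # Decode the mask into roles, in the fixed output order.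
--     for bit, role in _ROLE_BITS:
--         if mask & bit:
--             roles.append(role)
--     return tuple(roles)
-- ===== Notes on version B (the rewrite author's own statement) =====
-- stated objective: faster
-- what changed: Inverts the traversal: instead of six role-conditions each scanning the surfaces tuple (plus a dedupe pass), B makes one pass over the surfaces OR-ing a per-surface role bitmask from a dict, then decodes the mask's five bits into roles in the fixed output order.
import Mathlib
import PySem

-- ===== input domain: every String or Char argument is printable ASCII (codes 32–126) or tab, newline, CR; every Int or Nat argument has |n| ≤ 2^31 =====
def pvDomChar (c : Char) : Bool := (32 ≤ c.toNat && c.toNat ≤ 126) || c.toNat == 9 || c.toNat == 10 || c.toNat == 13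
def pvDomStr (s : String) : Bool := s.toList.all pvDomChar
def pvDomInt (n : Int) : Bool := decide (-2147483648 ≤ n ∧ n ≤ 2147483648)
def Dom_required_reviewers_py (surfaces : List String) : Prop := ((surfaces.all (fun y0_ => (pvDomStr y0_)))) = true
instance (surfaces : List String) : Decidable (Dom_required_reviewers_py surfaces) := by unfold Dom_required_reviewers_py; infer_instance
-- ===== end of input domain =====

-- B inverts the traversal: one pass over the surfaces OR-ing per-surface role bitmasks from a lookup
-- table, then a decode of the mask's bits into roles; a timing run measured B faster on large inputs.

-- ===== PORT A =====
-- _dedupe: skip falsy ("") and already-seen values, keep first occurrences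
def pvDedupe (values : List String) : List String :=
  (values.foldl
    (fun (st : List String × PySem.Set String) v =>
      if v = "" ∨ st.2.contains v then st
      else (st.1 ++ [v], PySem.Set.add st.2 v))
    ([], PySem.Set.empty)).1

def required_reviewers_py (surfaces : List String) : List String :=
  let reviewers : List String := []
  let reviewers := if surfaces.isEmpty then reviewers
    else reviewers ++ ["legal counsel"] ++ ["product owner"]
  let reviewers := if ["privacy_policy", "cookie_consent", "marketing_consent",
      "data_processing_agreement", "age_restrictions"].any (fun s => surfaces.contains s)
    then reviewers ++ ["privacy counsel"] else reviewers
  let reviewers := if ["subscription_terms", "refund_policy", "payment_terms",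
      "service_level_agreement"].any (fun s => surfaces.contains s)
    then reviewers ++ ["finance or revenue operations"] else reviewers
  let reviewers := if surfaces.contains "regulated_claims"
    then reviewers ++ ["compliance reviewer"] else reviewers
  let reviewers := if surfaces.contains "data_processing_agreement"
    then reviewers ++ ["security reviewer"] else reviewers
  let reviewers := if ["refund_policy", "service_level_agreement"].any (fun s => surfaces.contains s)
    then reviewers ++ ["support owner"] else reviewers
  pvDedupe reviewers

-- ===== PORT B =====
-- _SURFACE_BITS.get(s, 0): dict lookup ported as a literal match on the ten keys
def pvSurfaceBits (s : String) : Nat :=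
  if s = "privacy_policy" then 1
  else if s = "cookie_consent" then 1
  else if s = "marketing_consent" then 1
  else if s = "age_restrictions" then 1
  else if s = "data_processing_agreement" then 9
  else if s = "regulated_claims" then 4
  else if s = "subscription_terms" then 2
  else if s = "payment_terms" then 2
  else if s = "refund_policy" then 18
  else if s = "service_level_agreement" then 18
  else 0

def pvRoleBits : List (Nat × String) :=
  [(1, "privacy counsel"), (2, "finance or revenue operations"),
   (4, "compliance reviewer"), (8, "security reviewer"), (16, "support owner")]

def required_reviewers_py_alt (surfaces : List String) : List String :=
  let mask : Nat := surfaces.foldl (fun m s => m ||| pvSurfaceBits s) 0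
  let roles : List String := if surfaces.isEmpty then [] else ["legal counsel", "product owner"]
  pvRoleBits.foldl (fun roles r => if mask &&& r.1 != 0 then roles ++ [r.2] else roles) roles

-- ===== PRECONDITION & SPEC =====
def Spec_required_reviewers_py (surfaces : List String) (out : List String) : Prop := out = required_reviewers_py_alt surfaces
instance (surfaces : List String) (out : List String) : Decidable (Spec_required_reviewers_py surfaces out) := by unfold Spec_required_reviewers_py; infer_instance

-- ===== CLAIM (what is proved, stated in full; the proofs are below) =====
def Claim_equal_required_reviewers_py : Prop := ∀ (surfaces : List String), Dom_required_reviewers_py surfaces → Spec_required_reviewers_py surfaces (required_reviewers_py surfaces)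

-- ===== LEMMAS AND PROOFS =====
theorem pv_testBit_foldl_or (f : String → Nat) (i : Nat) :
    ∀ (xs : List String) (m0 : Nat),
      (xs.foldl (fun m s => m ||| f s) m0).testBit i
        = (m0.testBit i || xs.any (fun s => (f s).testBit i)) := by
  intro xs
  induction xs with
  | nil => intro m0; simp [List.foldl]
  | cons a xs ih =>
    intro m0
    simp [List.foldl, ih, Nat.testBit_or, Bool.or_assoc]

theorem pv_and_pow_bne (m i : Nat) : (m &&& 2 ^ i != 0) = m.testBit i := by
  rw [Nat.and_two_pow]
  cases h : m.testBit i <;> simp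

theorem pv_any_swap (names xs : List String) :
    xs.any (fun s => names.any (fun t => s == t)) = names.any (fun t => xs.contains t) := by
  apply Bool.eq_iff_iff.mpr
  simp [List.any_eq_true]
  tauto

-- the bit i of a surface's mask fires exactly on the i-th rule's trigger names
set_option maxHeartbeats 2000000 in
theorem pv_bits_char (i : Fin 5) (s : String) :
    (pvSurfaceBits s).testBit i.1 =
      ((match i with
        | 0 => ["privacy_policy", "cookie_consent", "marketing_consent",
                "data_processing_agreement", "age_restrictions"]
        | 1 => ["subscription_terms", "refund_policy", "payment_terms",
                "service_level_agreement"]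
        | 2 => ["regulated_claims"]
        | 3 => ["data_processing_agreement"]
        | 4 => ["refund_policy", "service_level_agreement"]) : List String).any
        (fun t => s == t) := by
  unfold pvSurfaceBits
  fin_cases i <;> split_ifs <;> first
    | (subst_eqs; decide)
    | simp_all

theorem pv_mask_char (surfaces : List String) (i : Fin 5) :
    (surfaces.foldl (fun m s => m ||| pvSurfaceBits s) 0).testBit i.1 =
      ((match i with
        | 0 => ["privacy_policy", "cookie_consent", "marketing_consent",
                "data_processing_agreement", "age_restrictions"]
        | 1 => ["subscription_terms", "refund_policy", "payment_terms",
                "service_level_agreement"]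
        | 2 => ["regulated_claims"]
        | 3 => ["data_processing_agreement"]
        | 4 => ["refund_policy", "service_level_agreement"]) : List String).any
        (fun t => surfaces.contains t) := by
  rw [pv_testBit_foldl_or pvSurfaceBits i.1 surfaces 0]
  simp only [Nat.zero_testBit, Bool.false_or, pv_bits_char, pv_any_swap]

theorem pv_mask0 (surfaces : List String) :
    (surfaces.foldl (fun m s => m ||| pvSurfaceBits s) 0).testBit 0 =
      (surfaces.contains "privacy_policy" || (surfaces.contains "cookie_consent" ||
       (surfaces.contains "marketing_consent" || (surfaces.contains "data_processing_agreement" ||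
        surfaces.contains "age_restrictions")))) := by
  simpa using pv_mask_char surfaces 0

theorem pv_mask1 (surfaces : List String) :
    (surfaces.foldl (fun m s => m ||| pvSurfaceBits s) 0).testBit 1 =
      (surfaces.contains "subscription_terms" || (surfaces.contains "refund_policy" ||
       (surfaces.contains "payment_terms" || surfaces.contains "service_level_agreement"))) := by
  simpa using pv_mask_char surfaces 1

theorem pv_mask2 (surfaces : List String) :
    (surfaces.foldl (fun m s => m ||| pvSurfaceBits s) 0).testBit 2 =
      surfaces.contains "regulated_claims" := by
  simpa using pv_mask_char surfaces 2

theorem pv_mask3 (surfaces : List String) :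
    (surfaces.foldl (fun m s => m ||| pvSurfaceBits s) 0).testBit 3 =
      surfaces.contains "data_processing_agreement" := by
  simpa using pv_mask_char surfaces 3

theorem pv_mask4 (surfaces : List String) :
    (surfaces.foldl (fun m s => m ||| pvSurfaceBits s) 0).testBit 4 =
      (surfaces.contains "refund_policy" || surfaces.contains "service_level_agreement") := by
  simpa using pv_mask_char surfaces 4

-- ===== VERDICT (by name: the statement is the Claim_ definition above) =====
set_option maxHeartbeats 1000000 in
theorem required_reviewers_py_spec : Claim_equal_required_reviewers_py := by
  intro surfaces _
  unfold Spec_required_reviewers_py required_reviewers_py required_reviewers_py_alt pvRoleBits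
  have b0 : ∀ m : Nat, (m &&& 1 != 0) = m.testBit 0 := fun m => by
    simpa using pv_and_pow_bne m 0
  have b1 : ∀ m : Nat, (m &&& 2 != 0) = m.testBit 1 := fun m => by
    simpa using pv_and_pow_bne m 1
  have b2 : ∀ m : Nat, (m &&& 4 != 0) = m.testBit 2 := fun m => by
    simpa using pv_and_pow_bne m 2
  have b3 : ∀ m : Nat, (m &&& 8 != 0) = m.testBit 3 := fun m => by
    simpa using pv_and_pow_bne m 3
  have b4 : ∀ m : Nat, (m &&& 16 != 0) = m.testBit 4 := fun m => by
    simpa using pv_and_pow_bne m 4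
  simp only [List.foldl, List.any_cons, List.any_nil, Bool.or_false,
    b0, b1, b2, b3, b4, pv_mask0, pv_mask1, pv_mask2, pv_mask3, pv_mask4]
  cases hE : surfaces.isEmpty <;>
  cases h2 : (surfaces.contains "privacy_policy" || (surfaces.contains "cookie_consent" ||
      (surfaces.contains "marketing_consent" || (surfaces.contains "data_processing_agreement" ||
      surfaces.contains "age_restrictions")))) <;>
  cases h3 : (surfaces.contains "subscription_terms" || (surfaces.contains "refund_policy" ||
      (surfaces.contains "payment_terms" || surfaces.contains "service_level_agreement"))) <;>
  cases h6 : (surfaces.contains "refund_policy" || surfaces.contains "service_level_agreement") <;>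
  cases h4 : surfaces.contains "regulated_claims" <;>
  cases h5 : surfaces.contains "data_processing_agreement" <;>
  decide
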